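-- pv_equiv track=rewrite | github.com/ericrosenn1/LitDataMatcher | lit_analyzer.py | has_will_infinitive
-- ===== SOURCE A (Python) =====
-- def has_will_infinitive(low: str) -> bool:
--     WILL_VERBS = ["reveal", "clarify", "determine", "validate", "replicate",
--                   "elucidate", "quantify", "compare", "test", "assess",
--                   "examine", "characterize", "investigate", "map", "measure"]
--     if "will " not in low:
--         return False
--     for v in WILL_VERBS:
--         if ("will " + v) in low:
--             return True
--     return False
-- ===== SOURCE B (Python) =====
-- def has_will_infinitive(low: str) -> bool:
--     WILL_VERBS = ("reveal", "clarify", "determine", "validate", "replicate",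
--                   "elucidate", "quantify", "compare", "test", "assess",
--                   "examine", "characterize", "investigate", "map", "measure")
--     for i in range(len(low)):
--         if low.startswith("will ", i) and low[i + 5:].startswith(WILL_VERBS):
--             return True
--     return False
-- ===== Notes on version B (the rewrite author's own statement) =====
-- stated objective: alternative
-- what changed: B scans the string once over anchor positions: at each index where the anchor phrase starts it does a constant-size prefix check against the verb list, instead of A's 15 independent full-substring searches over the whole string.
import Mathlib
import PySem

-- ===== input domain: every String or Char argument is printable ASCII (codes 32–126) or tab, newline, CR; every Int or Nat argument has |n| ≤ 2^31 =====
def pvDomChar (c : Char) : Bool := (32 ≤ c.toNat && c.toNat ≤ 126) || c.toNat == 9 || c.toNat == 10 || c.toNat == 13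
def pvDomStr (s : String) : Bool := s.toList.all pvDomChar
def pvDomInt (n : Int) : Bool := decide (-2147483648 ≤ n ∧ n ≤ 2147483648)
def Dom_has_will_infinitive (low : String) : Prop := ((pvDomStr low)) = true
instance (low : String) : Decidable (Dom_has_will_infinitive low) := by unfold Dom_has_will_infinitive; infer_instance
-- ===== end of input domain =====

-- B replaces A's fifteen full-string substring searches by one scan over anchor positions
-- with constant prefix checks (objective: alternative decomposition).

-- ===== PORT A =====
def pvWillVerbs : List String :=
  ["reveal", "clarify", "determine", "validate", "replicate",
   "elucidate", "quantify", "compare", "test", "assess",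
   "examine", "characterize", "investigate", "map", "measure"]

def has_will_infinitive (low : String) : Bool :=
  if !(PySem.Str.isIn "will " low) then false
  else pvWillVerbs.any (fun v => PySem.Str.isIn ("will " ++ v) low)

-- ===== PORT B =====
def pvWillVerbsAlt : List (List Char) :=
  ["reveal".toList, "clarify".toList, "determine".toList, "validate".toList, "replicate".toList,
   "elucidate".toList, "quantify".toList, "compare".toList, "test".toList, "assess".toList,
   "examine".toList, "characterize".toList, "investigate".toList, "map".toList, "measure".toList]

-- the loop `for i in range(len(low))`, walking the tails of the char list
def pvAltGo (cs : List Char) : Bool :=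
  match cs with
  | [] => false
  | _ :: rest =>
    if PySem.Chars.startswith cs "will ".toList
        && pvWillVerbsAlt.any (fun v => PySem.Chars.startswith (cs.drop 5) v) then
      true
    else pvAltGo rest

def has_will_infinitive_alt (low : String) : Bool :=
  pvAltGo low.toList

-- ===== PRECONDITION & SPEC =====
def Spec_has_will_infinitive (low : String) (out : Bool) : Prop := out = has_will_infinitive_alt low
instance (low : String) (out : Bool) : Decidable (Spec_has_will_infinitive low out) := by unfold Spec_has_will_infinitive; infer_instance

-- ===== CLAIM (what is proved, stated in full; the proofs are below) =====
def Claim_equal_has_will_infinitive : Prop := ∀ (low : String), Dom_has_will_infinitive low → Spec_has_will_infinitive low (has_will_infinitive low)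

-- ===== LEMMAS AND PROOFS =====

-- splitting a prefix: a ++ v is a prefix of cs iff a is and v is a prefix of the rest
theorem pv_prefix_append_split (a v cs : List Char) :
    (a ++ v <+: cs) ↔ (a <+: cs ∧ v <+: cs.drop a.length) := by
  constructor
  · intro h
    obtain ⟨t, ht⟩ := h
    constructor
    · exact ⟨v ++ t, by simp [← ht]⟩
    · refine ⟨t, ?_⟩
      rw [← ht]
      simp
  · rintro ⟨⟨t1, ht1⟩, ⟨t2, ht2⟩⟩
    refine ⟨t2, ?_⟩
    have hcs : cs = a ++ cs.drop a.length := by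
      conv_lhs => rw [← ht1]
      simp [← ht1]
    rw [hcs, List.append_assoc, ht2]

theorem pvAltGo_iff (cs : List Char) :
    pvAltGo cs = true ↔ ∃ v ∈ pvWillVerbsAlt, ("will ".toList ++ v) <:+: cs := by
  induction cs with
  | nil =>
    simp only [pvAltGo]
    constructor
    · intro h; exact absurd h (by simp)
    · rintro ⟨v, _, h⟩
      rw [List.infix_nil] at h
      simp at h
  | cons c rest ih =>
    rw [pvAltGo]
    constructor
    · intro h
      by_cases hc : (PySem.Chars.startswith (c :: rest) "will ".toList
          && pvWillVerbsAlt.any (fun v => PySem.Chars.startswith ((c :: rest).drop 5) v)) = true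
      · rw [Bool.and_eq_true] at hc
        obtain ⟨h1, h2⟩ := hc
        rw [PySem.Chars.startswith_iff] at h1
        rw [List.any_eq_true] at h2
        obtain ⟨v, hv, hpre⟩ := h2
        rw [PySem.Chars.startswith_iff] at hpre
        refine ⟨v, hv, List.IsPrefix.isInfix ?_⟩
        rw [pv_prefix_append_split]
        exact ⟨h1, by simpa using hpre⟩
      · rw [if_neg hc] at h
        obtain ⟨v, hv, hinf⟩ := ih.mp h
        exact ⟨v, hv, List.infix_cons_iff.mpr (Or.inr hinf)⟩
    · rintro ⟨v, hv, hinf⟩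
      rw [List.infix_cons_iff] at hinf
      rcases hinf with hpre | hinf
      · rw [pv_prefix_append_split] at hpre
        obtain ⟨h1, h2⟩ := hpre
        have : (PySem.Chars.startswith (c :: rest) "will ".toList
            && pvWillVerbsAlt.any (fun v => PySem.Chars.startswith ((c :: rest).drop 5) v)) = true := by
          rw [Bool.and_eq_true]
          refine ⟨(PySem.Chars.startswith_iff _ _).mpr h1, ?_⟩
          rw [List.any_eq_true]
          exact ⟨v, hv, (PySem.Chars.startswith_iff _ _).mpr (by simpa using h2)⟩
        rw [if_pos this]
      · have := ih.mpr ⟨v, hv, hinf⟩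
        split_ifs <;> simp [this]

theorem pvA_iff (low : String) :
    has_will_infinitive low = true ↔
      ∃ v ∈ pvWillVerbs, ("will ".toList ++ v.toList) <:+: low.toList := by
  rw [has_will_infinitive]
  by_cases hw : PySem.Str.isIn "will " low = true
  · rw [hw]
    simp only [Bool.not_true, Bool.false_eq_true, if_false, List.any_eq_true]
    constructor
    · rintro ⟨v, hv, h⟩
      rw [PySem.Str.isIn_iff_infix] at h
      exact ⟨v, hv, by simpa using h⟩
    · rintro ⟨v, hv, h⟩
      exact ⟨v, hv, (PySem.Str.isIn_iff_infix _ _).mpr (by simpa using h)⟩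
  · rw [Bool.not_eq_true] at hw
    rw [hw]
    simp only [Bool.not_false, if_true]
    constructor
    · intro h; exact absurd h (by simp)
    · rintro ⟨v, hv, h⟩
      exfalso
      have : "will ".toList <:+: low.toList :=
        (List.prefix_append "will ".toList v.toList).isInfix.trans h
      have : PySem.Str.isIn "will " low = true :=
        (PySem.Str.isIn_iff_infix _ _).mpr this
      rw [hw] at this
      exact absurd this (by simp)

theorem pv_verbs_map : pvWillVerbsAlt = pvWillVerbs.map String.toList := by
  decide

theorem pvB_iff (low : String) :
    has_will_infinitive_alt low = true ↔
      ∃ v ∈ pvWillVerbs, ("will ".toList ++ v.toList) <:+: low.toList := by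
  rw [has_will_infinitive_alt, pvAltGo_iff, pv_verbs_map]
  constructor
  · rintro ⟨v, hv, h⟩
    rw [List.mem_map] at hv
    obtain ⟨s, hs, rfl⟩ := hv
    exact ⟨s, hs, h⟩
  · rintro ⟨s, hs, h⟩
    exact ⟨s.toList, List.mem_map.mpr ⟨s, hs, rfl⟩, h⟩

-- ===== VERDICT (by name: the statement is the Claim_ definition above) =====
theorem has_will_infinitive_spec : Claim_equal_has_will_infinitive := by
  intro low _
  unfold Spec_has_will_infinitive
  have h := (pvA_iff low).trans (pvB_iff low).symm
  cases hA : has_will_infinitive low <;> cases hB : has_will_infinitive_alt low <;>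
    simp_all
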